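-- pv_equiv track=rewrite | github.com/ccied/ugforum-analysis | annotation_tools/code/standoff_annotations.py | chunk_ann
-- ===== SOURCE A (Python) =====
-- def standardise(chunks):
--   ans = []
--   for chunk in chunks:
--     if chunk[-1] == '{B':
--       ans.append((chunk[0], chunk[1], chunk[2], '['))
--     elif chunk[-1] == '{S':
--       ans.append((chunk[0], chunk[1], chunk[2], '{'))
--     elif chunk[-1] == '}' and len(ans) > 0 and ans[-1][-1] == '[':
--       ans.append((chunk[0], chunk[1], chunk[2], ']'))
--     else:
--       ans.append(chunk)
--   return ans
--
-- def chunk_ann(locations, ann):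
--   chunks = []
--   prev = (-2, -2)
--   for rawp, annp in locations:
--     if ann[annp] in ' \n()':
--       pass
--     elif rawp == prev[0] and annp == prev[1] + 1:
--       chunks[-1] = (chunks[-1][0], chunks[-1][1], annp, chunks[-1][3] + ann[annp])
--       prev = (rawp, annp)
--     else:
--       chunks.append((rawp, annp, annp, ann[annp]))
--       prev = (rawp, annp)
--   return standardise(chunks)
-- ===== SOURCE B (Python) =====
-- def chunk_ann(locations, ann):
--   # filter to the relevant points, split into maximal consecutive runs,
--   # then emit one normalized chunk per run
--   pts = [(r, p) for r, p in locations if ann[p] not in ' \n()']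
--   out = []
--   i = 0
--   n = len(pts)
--   while i < n:
--     j = i + 1
--     while j < n and pts[j][0] == pts[j - 1][0] and pts[j][1] == pts[j - 1][1] + 1:
--       j += 1
--     run = pts[i:j]
--     text = ''.join(ann[p] for _, p in run)
--     if text == '{B':
--       text = '['
--     elif text == '{S':
--       text = '{'
--     elif text == '}' and out and out[-1][3] == '[':
--       text = ']'
--     out.append((run[0][0], run[0][1], run[-1][1], text))
--     i = j
--   return out
-- ===== Notes on version B (the rewrite author's own statement) =====
-- stated objective: alternative
-- what changed: B replaces A's char-by-char stateful chunk mutation plus separate standardise pass with a filter/run-split pipeline: it filters the relevant points, splits them into maximal consecutive runs with a forward scan, and emits one normalized chunk per run.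
import Mathlib
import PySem

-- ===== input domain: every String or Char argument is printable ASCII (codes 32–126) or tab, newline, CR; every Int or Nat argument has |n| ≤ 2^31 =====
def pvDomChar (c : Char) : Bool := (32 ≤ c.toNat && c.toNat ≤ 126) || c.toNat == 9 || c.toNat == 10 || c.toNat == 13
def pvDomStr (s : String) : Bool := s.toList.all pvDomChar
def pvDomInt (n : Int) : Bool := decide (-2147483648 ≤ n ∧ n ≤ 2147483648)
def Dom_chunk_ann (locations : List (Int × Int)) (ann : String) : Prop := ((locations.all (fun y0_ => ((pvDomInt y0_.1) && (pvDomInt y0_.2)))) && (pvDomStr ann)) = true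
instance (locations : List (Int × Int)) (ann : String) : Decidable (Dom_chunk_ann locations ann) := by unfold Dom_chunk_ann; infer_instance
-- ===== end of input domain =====

-- B replaces A's stateful chunk-mutation loop + separate standardise pass with a
-- filter / run-split / per-run-emit pipeline (objective: alternative decomposition).

-- `c in ' \n()'` (the character test both Pythons share)
def pySkip (c : Char) : Bool := c == ' ' || c == '\n' || c == '(' || c == ')'

-- ===== PORT A =====
-- one iteration of standardise's loop body (appends the normalized chunk to ans)
def stdStep (ans : List (Int × Int × Int × String)) (chunk : Int × Int × Int × String) :
    List (Int × Int × Int × String) :=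
  if chunk.2.2.2 == "{B" then ans ++ [(chunk.1, chunk.2.1, chunk.2.2.1, "[")]
  else if chunk.2.2.2 == "{S" then ans ++ [(chunk.1, chunk.2.1, chunk.2.2.1, "{")]
  else if chunk.2.2.2 == "}" &&
      (match ans.getLast? with | some l => l.2.2.2 == "[" | none => false) then
    ans ++ [(chunk.1, chunk.2.1, chunk.2.2.1, "]")]
  else ans ++ [chunk]

def standardise (chunks : List (Int × Int × Int × String)) : List (Int × Int × Int × String) :=
  chunks.foldl stdStep []

-- one iteration of A's loop: state = (chunks, prev)
def stepA (ann : String) (st : List (Int × Int × Int × String) × Int × Int) (rp : Int × Int) :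
    List (Int × Int × Int × String) × Int × Int :=
  match PySem.Str.pyGet? ann rp.2 with
  | none => st      -- Python raises IndexError here; excluded by Pre_
  | some c =>
    if pySkip c then st
    else if rp.1 == st.2.1 && rp.2 == st.2.2 + 1 then
      match st.1.getLast? with
      | none => st  -- Python raises IndexError (chunks[-1] on []); excluded by Pre_
      | some last =>
        (st.1.dropLast ++ [(last.1, last.2.1, rp.2, last.2.2.2 ++ String.singleton c)],
         rp.1, rp.2)
    else (st.1 ++ [(rp.1, rp.2, rp.2, String.singleton c)], rp.1, rp.2)

def chunk_ann (locations : List (Int × Int)) (ann : String) : List (Int × Int × Int × String) :=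
  standardise (locations.foldl (stepA ann) ([], -2, -2)).1

-- ===== PORT B =====
-- Source B's filter predicate `ann[p] not in ' \n()'`
def activeB (ann : String) (rp : Int × Int) : Bool :=
  match PySem.Str.pyGet? ann rp.2 with
  | some c => !pySkip c
  | none => false   -- Python raises IndexError here; excluded by Pre_

-- `ann[p]` as a one-character string (the pieces ''.join concatenates)
def chA (ann : String) (rp : Int × Int) : String :=
  match PySem.Str.pyGet? ann rp.2 with
  | some c => String.singleton c
  | none => ""      -- unreachable under Pre_ (all points are in range)

-- Source B's inner `while j < n and adjacent` scan: split off the points continuing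
-- the run whose last point is p, returning (run continuation, remainder)
def takeRun (p : Int × Int) : List (Int × Int) → List (Int × Int) × List (Int × Int)
  | [] => ([], [])
  | y :: ys =>
    if y.1 == p.1 && y.2 == p.2 + 1 then
      (y :: (takeRun y ys).1, (takeRun y ys).2)
    else ([], y :: ys)

-- Source B's outer `while i < n` loop: the list of maximal consecutive runs
-- (structural recursion on a length fuel; takeRun_rest_len shows the fuel suffices)
def splitRunsF : Nat → List (Int × Int) → List (List (Int × Int))
  | 0, _ => []
  | _ + 1, [] => []
  | n + 1, x :: xs => (x :: (takeRun x xs).1) :: splitRunsF n (takeRun x xs).2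

def splitRuns (l : List (Int × Int)) : List (List (Int × Int)) := splitRunsF l.length l

-- ''.join(ann[p] for _, p in run)
def joinTxt (ann : String) (run : List (Int × Int)) : String :=
  run.foldl (fun s rp => s ++ chA ann rp) ""

-- Source B's loop body: build the run's chunk, normalize its text against the
-- already-emitted output, append it
def normStep (ann : String) (out : List (Int × Int × Int × String))
    (run : List (Int × Int)) : List (Int × Int × Int × String) :=
  match run with
  | [] => out       -- unreachable: splitRuns only yields nonempty runs
  | x :: _ =>
    let e := (run.getLast?.getD x).2
    let t := joinTxt ann run
    let t' := if t == "{B" then "["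
      else if t == "{S" then "{"
      else if t == "}" &&
          (match out.getLast? with | some l => l.2.2.2 == "[" | none => false) then "]"
      else t
    out ++ [(x.1, x.2, e, t')]

def chunk_ann_alt (locations : List (Int × Int)) (ann : String) :
    List (Int × Int × Int × String) :=
  (splitRuns (locations.filter (activeB ann))).foldl (normStep ann) []

-- ===== PRECONDITION & SPEC =====
-- Pre_ excludes exactly the inputs on which Python A raises IndexError: an annp out of
-- range for ann, or the first non-skipped point being (-2,-1), which makes A evaluate
-- chunks[-1] on the still-empty chunks list.
def Pre_chunk_ann (locations : List (Int × Int)) (ann : String) : Prop :=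
  (∀ rp ∈ locations, (PySem.Str.pyGet? ann rp.2).isSome) ∧
  locations.find? (activeB ann) ≠ some (-2, -1)

instance (locations : List (Int × Int)) (ann : String) : Decidable (Pre_chunk_ann locations ann) := by
  unfold Pre_chunk_ann; infer_instance

def pvWitness_chunk_ann : (List (Int × Int)) × String :=
  ([(0, 0), (0, 1), (0, 3), (0, 4), (1, 6), (1, 7), (2, 9)], "{B ab {S c}")

def Spec_chunk_ann (locations : List (Int × Int)) (ann : String)
    (out : List (Int × Int × Int × String)) : Prop := out = chunk_ann_alt locations ann
instance (locations : List (Int × Int)) (ann : String) (out : List (Int × Int × Int × String)) :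
    Decidable (Spec_chunk_ann locations ann out) := by unfold Spec_chunk_ann; infer_instance

-- ===== CLAIM (what is proved, stated in full; the proofs are below) =====
def Claim_equal_chunk_ann : Prop := ∀ (locations : List (Int × Int)) (ann : String), Dom_chunk_ann locations ann → Pre_chunk_ann locations ann → Spec_chunk_ann locations ann (chunk_ann locations ann)

-- ===== LEMMAS AND PROOFS =====

-- the fresh one-point chunk B starts a run with / A appends
def mkC (ann : String) (rp : Int × Int) : Int × Int × Int × String :=
  (rp.1, rp.2, rp.2, chA ann rp)

-- the raw (pre-normalization) chunk of a run
def rawC (ann : String) (run : List (Int × Int)) : Int × Int × Int × String :=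
  match run with
  | [] => (0, 0, 0, "")
  | x :: _ => (x.1, x.2, (run.getLast?.getD x).2, joinTxt ann run)

-- A's chunk evolution from an open chunk c whose last point is p, over active points
def extend (ann : String) (c : Int × Int × Int × String) (p : Int × Int) :
    List (Int × Int) → List (Int × Int × Int × String)
  | [] => [c]
  | y :: ys =>
    if y.1 == p.1 && y.2 == p.2 + 1 then
      extend ann (c.1, c.2.1, y.2, c.2.2.2 ++ chA ann y) y ys
    else c :: extend ann (mkC ann y) y ys


theorem activeB_some (ann : String) (x : Int × Int) (c : Char)
    (hg : PySem.Str.pyGet? ann x.2 = some c) : activeB ann x = !pySkip c := by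
  have hg' : PySem.List.pyGet? ann.toList x.2 = some c := hg
  simp [activeB, hg']

theorem activeB_none (ann : String) (x : Int × Int)
    (hg : PySem.Str.pyGet? ann x.2 = none) : activeB ann x = false := by
  have hg' : PySem.List.pyGet? ann.toList x.2 = none := hg
  simp [activeB, hg']

theorem chA_some (ann : String) (x : Int × Int) (c : Char)
    (hg : PySem.Str.pyGet? ann x.2 = some c) : chA ann x = String.singleton c := by
  have hg' : PySem.List.pyGet? ann.toList x.2 = some c := hg
  simp [chA, hg']

theorem foldA_filter (ann : String) : ∀ (l : List (Int × Int))
    (st : List (Int × Int × Int × String) × Int × Int),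
    l.foldl (stepA ann) st = (l.filter (activeB ann)).foldl (stepA ann) st := by
  intro l
  induction l with
  | nil => intro st; rfl
  | cons x xs ih =>
    intro st
    by_cases h : activeB ann x = true
    · simp [List.filter_cons, h, ih]
    · have hst : stepA ann st x = st := by
        unfold stepA
        cases hg : PySem.Str.pyGet? ann x.2 with
        | none => rfl
        | some c =>
          have hg' : PySem.List.pyGet? ann.toList x.2 = some c := hg
          have hsk : pySkip c = true := by
            rw [activeB_some ann x c hg] at h
            simpa using h
          simp [hg', hsk]
      simp [List.filter_cons, h, hst, ih]

theorem joinTxt_shift (ann : String) : ∀ (r : List (Int × Int)) (s t : String),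
    r.foldl (fun a rp => a ++ chA ann rp) (s ++ t) = s ++ r.foldl (fun a rp => a ++ chA ann rp) t := by
  intro r
  induction r with
  | nil => intro s t; rfl
  | cons y ys ih =>
    intro s t
    simp only [List.foldl_cons, String.append_assoc]
    exact ih s (t ++ chA ann y)

theorem joinTxt_cons (ann : String) (y : Int × Int) (ys : List (Int × Int)) :
    joinTxt ann (y :: ys) = chA ann y ++ joinTxt ann ys := by
  have h := joinTxt_shift ann ys (chA ann y) ""
  simp only [joinTxt, List.foldl_cons]
  simpa using h

theorem foldA_extend (ann : String) : ∀ (pts : List (Int × Int))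
    (chunks : List (Int × Int × Int × String)) (c : Int × Int × Int × String) (p : Int × Int),
    (∀ rp ∈ pts, activeB ann rp = true) →
    (pts.foldl (stepA ann) (chunks ++ [c], p)).1 = chunks ++ extend ann c p pts := by
  intro pts
  induction pts with
  | nil => intro chunks c p _; simp [extend]
  | cons y ys ih =>
    intro chunks c p hact
    have hy : activeB ann y = true := hact y (by simp)
    cases hg : PySem.Str.pyGet? ann y.2 with
    | none => rw [activeB_none ann y hg] at hy; exact absurd hy (by simp)
    | some cy =>
      have hg' : PySem.List.pyGet? ann.toList y.2 = some cy := hg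
      have hns : pySkip cy = false := by
        rw [activeB_some ann y cy hg] at hy; simpa using hy
      have hch : chA ann y = String.singleton cy := chA_some ann y cy hg
      simp only [List.foldl_cons]
      by_cases hadj : (y.1 == p.1 && y.2 == p.2 + 1) = true
      · have hstep : stepA ann (chunks ++ [c], p) y
            = (chunks ++ [(c.1, c.2.1, y.2, c.2.2.2 ++ chA ann y)], y.1, y.2) := by
          simp [stepA, hg', hns, hadj, hch]
        rw [hstep]
        rw [ih chunks _ y (fun rp hrp => hact rp (by simp [hrp]))]
        simp [extend, hadj]
      · have hstep : stepA ann (chunks ++ [c], p) y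
            = ((chunks ++ [c]) ++ [mkC ann y], y.1, y.2) := by
          simp [stepA, hg, hg', hns, mkC, hch]
          intro h1 h2
          exact absurd (by simp [h1, h2]) hadj
        rw [hstep]
        rw [ih (chunks ++ [c]) _ y (fun rp hrp => hact rp (by simp [hrp]))]
        simp [extend, hadj]

theorem takeRun_rest_len : ∀ (xs : List (Int × Int)) (p : Int × Int),
    (takeRun p xs).2.length ≤ xs.length
  | [], _ => Nat.le_refl _
  | y :: ys, p => by
    simp only [takeRun]
    split
    · exact Nat.le_trans (takeRun_rest_len ys y) (Nat.le_succ _)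
    · simp

theorem splitRunsF_eq : ∀ (n m : Nat) (l : List (Int × Int)), l.length ≤ n → l.length ≤ m →
    splitRunsF n l = splitRunsF m l := by
  intro n
  induction n with
  | zero =>
    intro m l hn _
    cases l with
    | nil => cases m <;> rfl
    | cons x xs => simp at hn
  | succ n ih =>
    intro m l hn hm
    cases l with
    | nil => cases m <;> rfl
    | cons x xs =>
      cases m with
      | zero => simp at hm
      | succ m =>
        have hr : (takeRun x xs).2.length ≤ xs.length := takeRun_rest_len xs x
        simp only [splitRunsF]
        rw [ih m _ (Nat.le_trans hr (by simpa using hn)) (Nat.le_trans hr (by simpa using hm))]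

theorem splitRuns_cons (x : Int × Int) (xs : List (Int × Int)) :
    splitRuns (x :: xs) = (x :: (takeRun x xs).1) :: splitRuns (takeRun x xs).2 := by
  simp only [splitRuns, List.length_cons, splitRunsF]
  exact congrArg _ (splitRunsF_eq xs.length (takeRun x xs).2.length _ (takeRun_rest_len xs x) (Nat.le_refl _))

theorem getD_getLast?_cons (a b : Int × Int) (l : List (Int × Int)) :
    (a :: l).getLast?.getD b = l.getLast?.getD a := by
  induction l using List.reverseRecOn with
  | nil => rfl
  | append_singleton xs v _ =>
    rw [show a :: (xs ++ [v]) = (a :: xs) ++ [v] from rfl, List.getLast?_concat,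
        List.getLast?_concat]
    rfl

theorem extend_eq (ann : String) : ∀ (pts : List (Int × Int))
    (c : Int × Int × Int × String) (p : Int × Int), c.2.2.1 = p.2 →
    extend ann c p pts =
      (c.1, c.2.1, (((takeRun p pts).1).getLast?.getD p).2,
        c.2.2.2 ++ joinTxt ann (takeRun p pts).1)
      :: (splitRuns (takeRun p pts).2).map (rawC ann) := by
  intro pts
  induction pts with
  | nil =>
    intro c p h
    obtain ⟨a, b, d, t⟩ := c
    simp at h
    simp [extend, takeRun, splitRuns, splitRunsF, joinTxt, h]
  | cons y ys ih =>
    intro c p h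
    by_cases hadj : (y.1 == p.1 && y.2 == p.2 + 1) = true
    · simp only [extend, hadj, if_true, takeRun]
      rw [ih (c.1, c.2.1, y.2, c.2.2.2 ++ chA ann y) y rfl]
      rw [joinTxt_cons]
      have he : ((y :: (takeRun y ys).1).getLast?.getD p) = ((takeRun y ys).1.getLast?.getD y) :=
        getD_getLast?_cons y p (takeRun y ys).1
      rw [he, ← String.append_assoc]
    · simp only [extend, hadj, if_false, takeRun, Bool.false_eq_true]
      rw [ih (mkC ann y) y rfl]
      rw [splitRuns_cons]
      simp only [List.map_cons]
      congr 1
      · obtain ⟨a, b, d, t⟩ := c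
        simp at h
        simp [joinTxt, h]
      congr 1
      simp only [rawC, mkC]
      rw [joinTxt_cons]
      cases (takeRun y ys).1 <;> simp

theorem splitRunsF_ne_nil : ∀ (n : Nat) (pts : List (Int × Int)),
    ∀ run ∈ splitRunsF n pts, run ≠ [] := by
  intro n
  induction n with
  | zero => intro pts run h; simp [splitRunsF] at h
  | succ n ih =>
    intro pts run h
    cases pts with
    | nil => simp [splitRunsF] at h
    | cons x xs =>
      simp only [splitRunsF, List.mem_cons] at h
      rcases h with h | h
      · subst h; simp
      · exact ih _ run h

theorem splitRuns_ne_nil (pts : List (Int × Int)) : ∀ run ∈ splitRuns pts, run ≠ [] :=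
  splitRunsF_ne_nil pts.length pts

theorem normStep_eq_stdStep (ann : String) (out : List (Int × Int × Int × String))
    (run : List (Int × Int)) (h : run ≠ []) :
    normStep ann out run = stdStep out (rawC ann run) := by
  cases run with
  | nil => exact absurd rfl h
  | cons x xs =>
    simp only [normStep, stdStep, rawC]
    split_ifs <;> rfl

theorem fold_norm (ann : String) : ∀ (runs : List (List (Int × Int)))
    (out : List (Int × Int × Int × String)), (∀ run ∈ runs, run ≠ []) →
    runs.foldl (normStep ann) out = (runs.map (rawC ann)).foldl stdStep out := by
  intro runs
  induction runs with
  | nil => intro out _; rfl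
  | cons r rs ih =>
    intro out hne
    simp only [List.map_cons, List.foldl_cons]
    rw [normStep_eq_stdStep ann out r (hne r (by simp))]
    exact ih _ (fun run h => hne run (by simp [h]))

theorem find?_eq_head_filter (p : (Int × Int) → Bool) : ∀ (l : List (Int × Int)),
    l.find? p = (l.filter p).head? := by
  intro l
  induction l with
  | nil => rfl
  | cons x xs ih =>
    simp only [List.find?_cons, List.filter_cons]
    by_cases h : p x = true
    · simp [h]
    · simp only [h]
      simpa using ih

-- ===== VERDICT (by name: the statements are the Claim_ definitions above) =====
theorem chunk_ann_spec : Claim_equal_chunk_ann := by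
  intro locations ann _ hpre
  unfold Spec_chunk_ann chunk_ann chunk_ann_alt
  rw [foldA_filter]
  have hfirst : (locations.filter (activeB ann)).head? ≠ some (-2, -1) := by
    rw [← find?_eq_head_filter]; exact hpre.2
  have hact : ∀ rp ∈ locations.filter (activeB ann), activeB ann rp = true := by
    intro rp hrp; exact (List.mem_filter.mp hrp).2
  cases hpts : locations.filter (activeB ann) with
  | nil => simp [standardise, splitRuns, splitRunsF]
  | cons x rest =>
    rw [hpts] at hact hfirst
    have hx : activeB ann x = true := hact x (by simp)
    cases hg : PySem.Str.pyGet? ann x.2 with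
    | none => rw [activeB_none ann x hg] at hx; exact absurd hx (by simp)
    | some cx =>
      have hg' : PySem.List.pyGet? ann.toList x.2 = some cx := hg
      have hns : pySkip cx = false := by
        rw [activeB_some ann x cx hg] at hx; simpa using hx
      have hxne : x ≠ ((-2 : Int), (-1 : Int)) := by
        intro he; exact hfirst (by simp [he])
      have hch : chA ann x = String.singleton cx := chA_some ann x cx hg
      have hstep : stepA ann ([], -2, -2) x = ([] ++ [mkC ann x], x.1, x.2) := by
        simp [stepA, hg, hg', hns, mkC, hch]
        intro h1 h2
        apply hxne
        have hx2 : x = (x.1, x.2) := rfl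
        rw [hx2, h1, h2]
      simp only [List.foldl_cons, hstep]
      rw [foldA_extend ann rest [] (mkC ann x) x (fun rp hrp => hact rp (by simp [hrp]))]
      rw [extend_eq ann rest (mkC ann x) x rfl]
      have hraw : (mkC ann x).1 = x.1 ∧ (mkC ann x).2.1 = x.2 ∧ (mkC ann x).2.2.2 = chA ann x := by
        simp [mkC]
      unfold standardise
      rw [fold_norm ann _ _ (splitRuns_ne_nil (x :: rest))]
      rw [splitRuns_cons]
      simp only [List.map_cons, List.nil_append]
      congr 2
      unfold rawC mkC
      rw [joinTxt_cons]
      congr 1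
      cases hr : (takeRun x rest).1 with
      | nil => simp
      | cons z zs => simp
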